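-- pv_equiv track=rewrite | github.com/OranPie/Re-LootPlusPlus | tools/drop_coverage.py | split_bracket_string
-- ===== SOURCE A (Python) =====
-- from typing import List, Optional, Tuple
--
-- def index_of_unnested(value: str, start: int, ch: str) -> Optional[int]:
--     depth = 0
--     in_quotes = False
--     i = start
--     while i < len(value):
--         canceled = i > 0 and value[i - 1] == "\\"
--         if not canceled:
--             if value[i] == '"':
--                 in_quotes = not in_quotes
--             if value[i] in "([{" and not in_quotes:
--                 depth += 1
--             if value[i] in ")]}" and not in_quotes:
--                 depth -= 1
--         if depth == 0 and not in_quotes and value[i] == ch: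
--             return i
--         i += 1
--     return None
--
-- def split_bracket_string(value: str, sep: str) -> List[str]:
--     points = [-1]
--     pos = -1
--     while True:
--         nxt = index_of_unnested(value, pos + 1, sep)
--         if nxt is None:
--             break
--         points.append(nxt)
--         pos = nxt
--     points.append(len(value))
--     return [value[points[i] + 1 : points[i + 1]].strip() for i in range(len(points) - 1)]
-- ===== SOURCE B (Python) =====
-- def split_bracket_string(value, sep):
--     results = []
--     depth = 0
--     in_quotes = False
--     start = 0
--     for i, c in enumerate(value):
--         canceled = i > 0 and value[i - 1] == "\\"
--         if not canceled:
--             if c == '"':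
--                 in_quotes = not in_quotes
--             if c in "([{" and not in_quotes:
--                 depth += 1
--             if c in ")]}" and not in_quotes:
--                 depth -= 1
--         if depth == 0 and not in_quotes and c == sep:
--             results.append(value[start:i].strip())
--             start = i + 1
--     results.append(value[start:].strip())
--     return results
-- ===== Notes on version B (the rewrite author's own statement) =====
-- stated objective: simpler
-- what changed: A repeatedly calls index_of_unnested, restarting the depth/quote state machine from scratch after every separator and collecting split points into a list before a final slicing pass; B is one linear scan over value that maintains depth, in_quotes and a segment start index and appends each stripped segment as it goes.
import Mathlib
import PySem

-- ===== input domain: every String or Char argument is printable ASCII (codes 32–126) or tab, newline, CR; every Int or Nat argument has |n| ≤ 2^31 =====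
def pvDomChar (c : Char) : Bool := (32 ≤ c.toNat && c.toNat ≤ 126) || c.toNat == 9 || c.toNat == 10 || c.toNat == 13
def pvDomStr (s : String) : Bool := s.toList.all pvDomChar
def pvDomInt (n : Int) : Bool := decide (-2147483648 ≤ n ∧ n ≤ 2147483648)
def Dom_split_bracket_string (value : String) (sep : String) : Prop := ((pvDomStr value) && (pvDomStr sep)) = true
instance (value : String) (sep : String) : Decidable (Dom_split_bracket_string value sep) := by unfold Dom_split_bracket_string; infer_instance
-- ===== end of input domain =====

-- B replaces A's repeated rescans (find next unnested separator, restart the state machine after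
-- it) by ONE linear scan keeping depth/in_quotes and a segment start index; objective: simpler.
-- Loops are ported with a structural fuel argument that is provably never exhausted on the calls
-- the ports make (the equivalence proof carries the sufficiency hypothesis).

-- ===== PORT A =====
-- per-character state update; these Python lines are verbatim identical in A and in B, so the
-- helpers are shared by both ports (Python locals are inlined)
def pvCanceled (cs : List Char) (i : Nat) : Bool := decide (0 < i) && (cs.getD (i - 1) ' ' == '\\')
def pvQuote (canceled : Bool) (c : Char) (inq : Bool) : Bool :=
  if !canceled && (c == '"') then !inq else inq
def pvDepth (canceled : Bool) (c : Char) (inq' : Bool) (depth : Int) : Int :=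
  if !canceled && (c == '(' || c == '[' || c == '{') && !inq' then
    (if !canceled && (c == ')' || c == ']' || c == '}') && !inq' then depth + 1 - 1 else depth + 1)
  else
    (if !canceled && (c == ')' || c == ']' || c == '}') && !inq' then depth - 1 else depth)

def pvIouLoop (cs sepc : List Char) : Nat → Nat → Int → Bool → Option Nat
  | 0, _, _, _ => none
  | fuel + 1, i, depth, inq =>
    if h : i < cs.length then
      if pvDepth (pvCanceled cs i) cs[i] (pvQuote (pvCanceled cs i) cs[i] inq) depth == 0
          && !(pvQuote (pvCanceled cs i) cs[i] inq) && sepc == [cs[i]] then some i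
      else pvIouLoop cs sepc fuel (i + 1)
          (pvDepth (pvCanceled cs i) cs[i] (pvQuote (pvCanceled cs i) cs[i] inq) depth)
          (pvQuote (pvCanceled cs i) cs[i] inq)
    else none

-- the while-True loop of split_bracket_string: repeatedly find the next unnested separator
def pvALoop (cs sepc : List Char) : Nat → Int → List Int → List Int
  | 0, _, points => points
  | fuel + 1, pos, points =>
    match pvIouLoop cs sepc (cs.length - (pos + 1).toNat) (pos + 1).toNat 0 false with
    | none => points
    | some n => pvALoop cs sepc fuel (n : Int) (points ++ [(n : Int)])

def split_bracket_string (value : String) (sep : String) : List String :=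
  let cs := value.toList
  let points := pvALoop cs sep.toList (cs.length + 1) (-1) [-1] ++ [(cs.length : Int)]
  (PySem.List.pyRange 0 ((points.length : Int) - 1) 1).map (fun i =>
    String.ofList (PySem.Chars.strip (PySem.List.slice cs
      (some (PySem.List.pyGetD points i 0 + 1)) (some (PySem.List.pyGetD points (i + 1) 0)))))

-- ===== PORT B =====
-- single pass: same per-character state machine, plus segment start and results accumulator
def pvBLoop (cs sepc : List Char) : Nat → Nat → Int → Bool → Nat → List String → List String
  | 0, _, _, _, start, acc =>
      acc ++ [String.ofList (PySem.Chars.strip (PySem.List.slice cs (some (start : Int)) none))]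
  | fuel + 1, i, depth, inq, start, acc =>
    if h : i < cs.length then
      if pvDepth (pvCanceled cs i) cs[i] (pvQuote (pvCanceled cs i) cs[i] inq) depth == 0
          && !(pvQuote (pvCanceled cs i) cs[i] inq) && sepc == [cs[i]] then
        pvBLoop cs sepc fuel (i + 1)
          (pvDepth (pvCanceled cs i) cs[i] (pvQuote (pvCanceled cs i) cs[i] inq) depth)
          (pvQuote (pvCanceled cs i) cs[i] inq) (i + 1)
          (acc ++ [String.ofList (PySem.Chars.strip (PySem.List.slice cs (some (start : Int)) (some (i : Int))))])
      else
        pvBLoop cs sepc fuel (i + 1)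
          (pvDepth (pvCanceled cs i) cs[i] (pvQuote (pvCanceled cs i) cs[i] inq) depth)
          (pvQuote (pvCanceled cs i) cs[i] inq) start acc
    else acc ++ [String.ofList (PySem.Chars.strip (PySem.List.slice cs (some (start : Int)) none))]

def split_bracket_string_alt (value : String) (sep : String) : List String :=
  pvBLoop value.toList sep.toList value.toList.length 0 0 false 0 []

-- ===== PRECONDITION & SPEC =====
def Spec_split_bracket_string (value : String) (sep : String) (out : List String) : Prop := out = split_bracket_string_alt value sep
instance (value : String) (sep : String) (out : List String) : Decidable (Spec_split_bracket_string value sep out) := by unfold Spec_split_bracket_string; infer_instance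

-- ===== CLAIM (what is proved, stated in full; the proofs are below) =====
def Claim_equal_split_bracket_string : Prop := ∀ (value : String) (sep : String), Dom_split_bracket_string value sep → Spec_split_bracket_string value sep (split_bracket_string value sep)

-- ===== LEMMAS AND PROOFS =====

theorem pvIouLoop_bounds (cs sepc : List Char) (f : Nat) (i : Nat) (d : Int) (q : Bool) (n : Nat)
    (h : pvIouLoop cs sepc f i d q = some n) : i ≤ n ∧ n < cs.length := by
  fun_induction pvIouLoop cs sepc f i d q with
  | case1 => simp at h
  | case2 f i d q hlen hcond => cases h; omega
  | case3 f i d q hlen hcond ih => have := ih h; omega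
  | case4 f i d q hlen => simp at h

theorem pvIouLoop_none_of_le (cs sepc : List Char) (f : Nat) (i : Nat) (d : Int) (q : Bool)
    (h : cs.length ≤ i) : pvIouLoop cs sepc f i d q = none := by
  cases f with
  | zero => rfl
  | succ f => rw [pvIouLoop, dif_neg (by omega)]

theorem pvIouLoop_irrel (cs sepc : List Char) (f : Nat) :
    ∀ (g i : Nat) (d : Int) (q : Bool), cs.length ≤ i + f → cs.length ≤ i + g →
      pvIouLoop cs sepc f i d q = pvIouLoop cs sepc g i d q := by
  induction f with
  | zero =>
      intro g i d q hf hg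
      rw [pvIouLoop_none_of_le cs sepc 0 i d q (by omega),
        pvIouLoop_none_of_le cs sepc g i d q (by omega)]
  | succ f ih =>
      intro g i d q hf hg
      by_cases hlen : i < cs.length
      · cases g with
        | zero => omega
        | succ g =>
            rw [pvIouLoop, pvIouLoop, dif_pos hlen, dif_pos hlen]
            split
            · rfl
            · exact ih g (i + 1) _ _ (by omega) (by omega)
      · rw [pvIouLoop_none_of_le cs sepc _ i d q (by omega),
          pvIouLoop_none_of_le cs sepc g i d q (by omega)]

-- the segment list produced from scan position s with fresh state: the common characterisation
def pvResA (cs sepc : List Char) (s : Nat) : List String :=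
  match h : pvIouLoop cs sepc (cs.length - s) s 0 false with
  | none => [String.ofList (PySem.Chars.strip (PySem.List.slice cs (some (s : Int)) none))]
  | some n =>
      String.ofList (PySem.Chars.strip (PySem.List.slice cs (some (s : Int)) (some (n : Int)))) ::
        pvResA cs sepc (n + 1)
termination_by cs.length + 1 - s
decreasing_by
  have := pvIouLoop_bounds cs sepc (cs.length - s) s 0 false n h
  omega

theorem pvBLoop_match (cs sepc : List Char) (f : Nat) :
    ∀ (i : Nat) (d : Int) (q : Bool) (start : Nat) (acc : List String),
    cs.length ≤ i + f →
    pvBLoop cs sepc f i d q start acc =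
      match pvIouLoop cs sepc f i d q with
      | none => acc ++ [String.ofList (PySem.Chars.strip (PySem.List.slice cs (some (start : Int)) none))]
      | some n => pvBLoop cs sepc (f - 1 - (n - i)) (n + 1) 0 false (n + 1)
          (acc ++ [String.ofList (PySem.Chars.strip (PySem.List.slice cs (some (start : Int)) (some (n : Int))))]) := by
  induction f with
  | zero => intro i d q start acc hf; rfl
  | succ f ih =>
      intro i d q start acc hf
      by_cases hlen : i < cs.length
      · rw [pvBLoop, pvIouLoop, dif_pos hlen, dif_pos hlen]
        by_cases hcond : (pvDepth (pvCanceled cs i) cs[i] (pvQuote (pvCanceled cs i) cs[i] q) d == 0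
            && !(pvQuote (pvCanceled cs i) cs[i] q) && sepc == [cs[i]]) = true
        · rw [if_pos hcond, if_pos hcond]
          simp only [Bool.and_eq_true, beq_iff_eq, Bool.not_eq_true'] at hcond
          rw [hcond.1.1, hcond.1.2]
          show _ = pvBLoop cs sepc (f + 1 - 1 - (i - i)) (i + 1) 0 false (i + 1) _
          have : f + 1 - 1 - (i - i) = f := by omega
          rw [this]
        · rw [if_neg hcond, if_neg hcond]
          rw [ih (i + 1) _ _ start acc (by omega)]
          cases hio : pvIouLoop cs sepc f (i + 1)
              (pvDepth (pvCanceled cs i) cs[i] (pvQuote (pvCanceled cs i) cs[i] q) d)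
              (pvQuote (pvCanceled cs i) cs[i] q) with
          | none => rfl
          | some n =>
              have hb := pvIouLoop_bounds cs sepc f (i + 1) _ _ n hio
              show pvBLoop cs sepc (f - 1 - (n - (i + 1))) _ _ _ _ _ = _
              have : f - 1 - (n - (i + 1)) = f + 1 - 1 - (n - i) := by omega
              rw [this]
      · rw [pvBLoop, pvIouLoop, dif_neg hlen, dif_neg hlen]

theorem pvBLoop_eq_resA (cs sepc : List Char) (s : Nat) :
    ∀ (f : Nat) (acc : List String), cs.length ≤ s + f →
    pvBLoop cs sepc f s 0 false s acc = acc ++ pvResA cs sepc s := by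
  fun_induction pvResA cs sepc s with
  | case1 s hio =>
      intro f acc hf
      rw [pvBLoop_match cs sepc f s 0 false s acc (by omega),
        pvIouLoop_irrel cs sepc f (cs.length - s) s 0 false (by omega) (by omega), hio]
  | case2 s n hio ih =>
      intro f acc hf
      have hb := pvIouLoop_bounds cs sepc (cs.length - s) s 0 false n hio
      rw [pvBLoop_match cs sepc f s 0 false s acc (by omega),
        pvIouLoop_irrel cs sepc f (cs.length - s) s 0 false (by omega) (by omega), hio]
      show pvBLoop cs sepc (f - 1 - (n - s)) (n + 1) 0 false (n + 1) _ = _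
      rw [ih (f - 1 - (n - s)) _ (by omega), List.append_assoc, List.singleton_append]

-- A's comprehension over consecutive point pairs
def pvPairs (cs : List Char) : List Int → List String
  | a :: b :: r =>
      String.ofList (PySem.Chars.strip (PySem.List.slice cs (some (a + 1)) (some b))) ::
        pvPairs cs (b :: r)
  | _ => []

theorem pvGetD_pairs (cs : List Char) (pts : List Int) :
    (List.range (pts.length - 1)).map (fun k =>
      String.ofList (PySem.Chars.strip (PySem.List.slice cs
        (some (pts.getD k 0 + 1)) (some (pts.getD (k + 1) 0))))) = pvPairs cs pts := by
  induction pts with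
  | nil => simp [pvPairs]
  | cons a tail ih =>
      cases tail with
      | nil => simp [pvPairs]
      | cons b r =>
          have hlen : (a :: b :: r).length - 1 = r.length + 1 := by simp
          rw [hlen, List.range_succ_eq_map, List.map_cons, List.map_map]
          show _ :: (List.range ((b :: r).length - 1)).map _ = _
          rw [pvPairs]
          congr 1

theorem pvRangeMap_eq_pairs (cs : List Char) (pts : List Int) :
    (PySem.List.pyRange 0 ((pts.length : Int) - 1) 1).map (fun i =>
      String.ofList (PySem.Chars.strip (PySem.List.slice cs
        (some (PySem.List.pyGetD pts i 0 + 1)) (some (PySem.List.pyGetD pts (i + 1) 0))))) =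
    pvPairs cs pts := by
  rw [PySem.List.pyRange_one, List.map_map]
  have h1 : (((pts.length : Int) - 1) - 0).toNat = pts.length - 1 := by omega
  rw [h1, ← pvGetD_pairs cs pts]
  apply List.map_congr_left
  intro k _
  have h2 : (0 : Int) + (k : Nat) = ((k : Nat) : Int) := by omega
  have h3 : ((k : Nat) : Int) + 1 = (((k + 1 : Nat)) : Int) := by omega
  simp only [Function.comp_apply, h2, h3, PySem.List.pyGetD_natCast]

theorem pvALoop_append (cs sepc : List Char) (f : Nat) :
    ∀ (pos : Int) (pts2 pts1 : List Int),
    pvALoop cs sepc f pos (pts1 ++ pts2) = pts1 ++ pvALoop cs sepc f pos pts2 := by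
  induction f with
  | zero => intro pos pts2 pts1; rfl
  | succ f ih =>
      intro pos pts2 pts1
      rw [pvALoop, pvALoop]
      cases hio : pvIouLoop cs sepc (cs.length - (pos + 1).toNat) (pos + 1).toNat 0 false with
      | none => rfl
      | some n =>
          show pvALoop cs sepc f (n : Int) (pts1 ++ pts2 ++ [(n : Int)]) = _
          rw [List.append_assoc, ih]

theorem pvPairs_eq_resA (cs sepc : List Char) (s : Nat) :
    ∀ (f : Nat), cs.length ≤ s + f →
    pvPairs cs ((((s : Int) - 1) :: pvALoop cs sepc f ((s : Int) - 1) []) ++ [(cs.length : Int)]) =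
      pvResA cs sepc s := by
  fun_induction pvResA cs sepc s with
  | case1 s hio =>
      intro f hf
      have hpos : (((s : Int) - 1) + 1).toNat = s := by omega
      have halo : pvALoop cs sepc f ((s : Int) - 1) [] = [] := by
        cases f with
        | zero => rfl
        | succ f => rw [pvALoop, hpos, hio]
      rw [halo]
      show [String.ofList (PySem.Chars.strip (PySem.List.slice cs
        (some ((s : Int) - 1 + 1)) (some (cs.length : Int))))] = _
      have h1 : (s : Int) - 1 + 1 = (s : Int) := by ring
      rw [h1, PySem.List.slice_natCast, PySem.List.slice_from_natCast,
        List.take_of_length_le (by simp)]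
  | case2 s n hio ih =>
      intro f hf
      have hb := pvIouLoop_bounds cs sepc (cs.length - s) s 0 false n hio
      have hpos : (((s : Int) - 1) + 1).toNat = s := by omega
      cases f with
      | zero =>
          exfalso
          have : cs.length ≤ s := by omega
          rw [pvIouLoop_none_of_le cs sepc _ s 0 false this] at hio
          simp at hio
      | succ f =>
          rw [pvALoop, hpos, hio]
          show pvPairs cs ((((s : Int) - 1) :: pvALoop cs sepc f (n : Int) ([] ++ [(n : Int)])) ++ [(cs.length : Int)]) = _
          have h2 : ([] : List Int) ++ [(n : Int)] = [(n : Int)] ++ [] := by simp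
          rw [h2, pvALoop_append]
          show pvPairs cs (((s : Int) - 1) :: (n : Int) :: (pvALoop cs sepc f (n : Int) [] ++ [(cs.length : Int)])) = _
          rw [pvPairs]
          have h3 : (n : Int) = (((n + 1 : Nat) : Int) - 1) := by push_cast; ring
          have h1 : (s : Int) - 1 + 1 = (s : Int) := by ring
          rw [h1, h3]
          congr 1
          rw [← h3]
          have h4 : (n : Int) = ((n + 1 : Nat) : Int) - 1 := by push_cast; ring
          rw [h4]
          exact ih f (by omega)

-- ===== VERDICT (by name: the statement is the Claim_ definition above) =====
theorem split_bracket_string_spec : Claim_equal_split_bracket_string := by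
  intro value sep _
  unfold Spec_split_bracket_string split_bracket_string split_bracket_string_alt
  rw [pvRangeMap_eq_pairs]
  have h0 : pvALoop value.toList sep.toList (value.toList.length + 1) (-1) [-1]
      = ((-1 : Int) :: pvALoop value.toList sep.toList (value.toList.length + 1) (-1) []) := by
    simpa using pvALoop_append value.toList sep.toList (value.toList.length + 1) (-1) [] [-1]
  rw [h0]
  have h1 : (-1 : Int) = ((0 : Nat) : Int) - 1 := by norm_num
  rw [h1, pvPairs_eq_resA value.toList sep.toList 0 (value.toList.length + 1) (by omega),
    pvBLoop_eq_resA value.toList sep.toList 0 value.toList.length [] (by omega)]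
  simp
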